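-- pv_equiv track=rewrite | github.com/hieuducnguyen/BigOCourse | 4_stack_queue/throwing_cards_away_I.py | throwCard
-- ===== SOURCE A (Python) =====
-- from queue import Queue
--
-- def throwCard(N):
--     q = Queue()
--     for i in range(1, N + 1):
--         q.put(i)
--     list_throw = []
--     while q.qsize() > 1:
--         first = q.get()
--         list_throw.append(first)
--         second = q.get()
--         q.put(second)
--
--     return list_throw, q.get() if q.qsize() > 0 else None
-- ===== SOURCE B (Python) =====
-- def throwCard(N):
--     deck = list(range(1, N + 1))
--     thrown = []
--     throw_next = True
--     while len(deck) > 1: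
--         new_deck = []
--         for card in deck:
--             if throw_next:
--                 thrown.append(card)
--             else:
--                 new_deck.append(card)
--             throw_next = not throw_next
--         deck = new_deck
--     return thrown, deck[0] if deck else None
-- ===== Notes on version B (the rewrite author's own statement) =====
-- stated objective: faster
-- what changed: Replaces the Queue-based one-card-at-a-time simulation (get/put per step) with pass-based list rebuilding: each pass walks the current deck once with a carried throw/keep parity flag, appending survivors to a new list.
import Mathlib
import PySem

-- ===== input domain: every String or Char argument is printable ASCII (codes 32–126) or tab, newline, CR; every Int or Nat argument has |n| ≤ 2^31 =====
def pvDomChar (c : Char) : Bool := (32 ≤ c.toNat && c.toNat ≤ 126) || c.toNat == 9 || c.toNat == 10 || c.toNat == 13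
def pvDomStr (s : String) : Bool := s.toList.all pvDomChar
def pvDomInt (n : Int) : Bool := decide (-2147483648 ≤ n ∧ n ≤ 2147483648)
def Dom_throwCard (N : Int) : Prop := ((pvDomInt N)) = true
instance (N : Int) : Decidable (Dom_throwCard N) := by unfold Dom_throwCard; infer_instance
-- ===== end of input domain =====

-- B replaces A's card-at-a-time Queue simulation by whole-pass list rebuilding with a
-- carried throw/keep parity flag (objective: faster, constant factor — no per-card queue ops).

-- ===== PORT A =====
-- A's while loop: the queue as a list (front = next get), accumulator = list_throw
def goA : List Int → List Int → List Int × Option Int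
  | x :: y :: r, acc => goA (r ++ [y]) (acc ++ [x])
  | q, acc => (acc, q.head?)
termination_by q _ => q.length
decreasing_by simp

def throwCard (N : Int) : List Int × Option Int :=
  goA (PySem.List.pyRange 1 (N + 1) 1) []

-- ===== PORT B =====
-- one pass (Source B's inner for loop): returns (new_deck, final flag, cards thrown this pass)
def passB : List Int → Bool → List Int × Bool × List Int
  | [], f => ([], f, [])
  | x :: r, f =>
    let (k, f', th) := passB r (!f)
    if f then (k, f', x :: th) else (x :: k, f', th)

theorem passB_cons_true (x : Int) (r : List Int) :
    passB (x :: r) true = ((passB r false).1, ((passB r false).2.1, x :: (passB r false).2.2)) := by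
  rcases hp : passB r false with ⟨k, f', th⟩
  simp [passB, hp]

theorem passB_cons_false (x : Int) (r : List Int) :
    passB (x :: r) false = (x :: (passB r true).1, ((passB r true).2.1, (passB r true).2.2)) := by
  rcases hp : passB r true with ⟨k, f', th⟩
  simp [passB, hp]

-- length facts cited by bloopB's decreasing_by
theorem passB_len_le (r : List Int) (f : Bool) : (passB r f).1.length ≤ r.length := by
  induction r generalizing f with
  | nil => simp [passB]
  | cons x r ih =>
    cases f with
    | true => simp only [passB_cons_true]; exact le_trans (ih false) (Nat.le_succ _)
    | false => simp only [passB_cons_false, List.length_cons]; exact Nat.succ_le_succ (ih true)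

theorem passB_len_lt (d : List Int) (f : Bool) (h : 2 ≤ d.length) :
    (passB d f).1.length < d.length := by
  match d, h with
  | x :: r, _ =>
    cases f with
    | true =>
      simp only [passB_cons_true, List.length_cons]
      exact Nat.lt_succ_of_le (passB_len_le r false)
    | false =>
      match r with
      | y :: r' =>
        have := passB_len_le r' false
        simp only [passB_cons_false, passB_cons_true, List.length_cons]
        omega

-- Source B's while loop: repeat passes until at most one card remains
def bloopB (deck : List Int) (f : Bool) (acc : List Int) : List Int × Option Int :=
  if deck.length ≤ 1 then (acc, deck.head?)
  else
    bloopB (passB deck f).1 (passB deck f).2.1 (acc ++ (passB deck f).2.2)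
termination_by deck.length
decreasing_by exact passB_len_lt deck f (by omega)

def throwCard_alt (N : Int) : List Int × Option Int :=
  bloopB (PySem.List.pyRange 1 (N + 1) 1) true []

-- ===== PRECONDITION & SPEC =====
def Spec_throwCard (N : Int) (out : List Int × Option Int) : Prop := out = throwCard_alt N
instance (N : Int) (out : List Int × Option Int) : Decidable (Spec_throwCard N out) := by unfold Spec_throwCard; infer_instance

-- ===== CLAIM (what is proved, stated in full; the proofs are below) =====
def Claim_equal_throwCard : Prop := ∀ (N : Int), Dom_throwCard N → Spec_throwCard N (throwCard N)

-- ===== LEMMAS AND PROOFS =====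

theorem goA_two (x y : Int) (r acc : List Int) :
    goA (x :: y :: r) acc = goA (r ++ [y]) (acc ++ [x]) := by
  rw [goA.eq_def]

theorem goA_nil (acc : List Int) : goA [] acc = (acc, none) := by rw [goA.eq_def]; simp

theorem goA_one (x : Int) (acc : List Int) : goA [x] acc = (acc, some x) := by
  rw [goA.eq_def]; simp

theorem bloopB_small (deck : List Int) (f : Bool) (acc : List Int) (h : deck.length ≤ 1) :
    bloopB deck f acc = (acc, deck.head?) := by
  rw [bloopB.eq_def]; simp [h]

theorem bloopB_step (deck : List Int) (f : Bool) (acc : List Int) (h : 2 ≤ deck.length) :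
    bloopB deck f acc =
      bloopB (passB deck f).1 (passB deck f).2.1 (acc ++ (passB deck f).2.2) := by
  rw [bloopB.eq_def]
  have : ¬ deck.length ≤ 1 := by omega
  simp [this]

-- Invariant: mid-pass (at a point where the next card would be thrown), A's queue is
-- (unprocessed rest) ++ (cards kept so far this pass); finishing the pass over rest
-- from flag = true and continuing B's outer loop reproduces A's loop exactly.
theorem bridge : ∀ (M : ℕ) (rest kept acc : List Int),
    (rest.length + kept.length) * (rest.length + kept.length + 1) + rest.length = M →
    (rest = [] ∨ kept ≠ []) →
    goA (rest ++ kept) acc =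
      bloopB (kept ++ (passB rest true).1) (passB rest true).2.1
        (acc ++ (passB rest true).2.2) := by
  intro M
  induction M using Nat.strong_induction_on with
  | _ M IH =>
    intro rest kept acc hM hk
    match rest, hk with
    | [], _ =>
      simp only [passB, List.nil_append, List.append_nil]
      match kept with
      | [] => rw [goA_nil, bloopB_small _ _ _ (by simp)]; rfl
      | [a] => rw [goA_one, bloopB_small _ _ _ (by simp)]; rfl
      | a :: b :: r =>
        rw [goA_two, bloopB_step _ _ _ (by simp)]
        simp only [passB_cons_true, passB_cons_false]
        have hb := IH ((r.length + 1) * (r.length + 2) + r.length)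
          (by subst hM; simp; nlinarith [r.length.zero_le])
          r [b] (acc ++ [a]) (by simp) (Or.inr (by simp))
        rw [hb]; simp
    | x :: r, hk =>
      have hkept : kept ≠ [] := by
        rcases hk with h | h
        · exact absurd h (by simp)
        · exact h
      match r with
      | [] =>
        -- the pass ends after throwing x; B starts the next pass on kept with flag false
        rw [show passB [x] true = ([], false, [x]) from by simp [passB]]
        simp only [List.append_nil, List.singleton_append]
        match kept, hkept with
        | [c], _ =>
          rw [goA_two, bloopB_small _ _ _ (by simp)]
          simp [goA_one]
        | c :: z :: ks, _ =>
          rw [goA_two, bloopB_step _ _ _ (by simp)]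
          simp only [passB_cons_false]
          have hb := IH ((ks.length + 2) * (ks.length + 3) + (ks.length + 1))
            (by subst hM; simp; nlinarith [ks.length.zero_le])
            (z :: ks) [c] (acc ++ [x]) (by simp; try ring) (Or.inr (by simp))
          rw [hb]; simp
      | z :: r' =>
        -- A throws x and requeues z; B records x as thrown and keeps z
        rw [show ((x :: z :: r') ++ kept : List Int) = x :: z :: (r' ++ kept) from rfl, goA_two]
        simp only [passB_cons_true, passB_cons_false]
        have hb := IH ((r'.length + kept.length + 1) * (r'.length + kept.length + 2) + r'.length)
          (by subst hM; simp; nlinarith [r'.length.zero_le, kept.length.zero_le])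
          r' (kept ++ [z]) (acc ++ [x]) (by simp; try ring) (Or.inr (by simp))
        rw [show ((r' ++ kept) ++ [z] : List Int) = r' ++ (kept ++ [z]) by simp, hb]
        simp

-- ===== VERDICT (by name: the statement is the Claim_ definition above) =====
theorem throwCard_spec : Claim_equal_throwCard := by
  intro N _
  unfold Spec_throwCard throwCard throwCard_alt
  have h := bridge ((0 + (PySem.List.pyRange 1 (N + 1) 1).length) *
      (0 + (PySem.List.pyRange 1 (N + 1) 1).length + 1) + 0)
    [] (PySem.List.pyRange 1 (N + 1) 1) [] (by simp) (Or.inl rfl)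
  simpa [passB] using h
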